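-- pv_equiv track=rewrite | github.com/mohin-io/Mixed-Integer-Optimization-for-Portfolio-Selection-using-ML-Driven-Heuristics | src/data/esg_scorer.py | sdg_alignment
-- ===== SOURCE A (Python) =====
-- from typing import Optional, Dict, List, Tuple
--
-- def sdg_alignment(
--     tickers: List[str],
--     sdg_mapping: Dict[str, List[int]]
-- ) -> Dict[int, List[str]]:
--     """
--     Map portfolio to UN Sustainable Development Goals.
--
--     Args:
--         tickers: Portfolio tickers
--         sdg_mapping: Mapping of ticker to SDG numbers (1-17)
--
--     Returns:
--         Dictionary mapping SDG to contributing tickers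
--     """
--     sdg_portfolio = {}
--
--     for ticker in tickers:
--         if ticker in sdg_mapping:
--             for sdg in sdg_mapping[ticker]:
--                 if sdg not in sdg_portfolio:
--                     sdg_portfolio[sdg] = []
--                 sdg_portfolio[sdg].append(ticker)
--
--     return sdg_portfolio
-- ===== SOURCE B (Python) =====
-- def sdg_alignment(tickers, sdg_mapping):
--     # Flatten to (sdg, ticker) pairs once, then group by sdg in first-appearance order.
--     pairs = [(sdg, t) for t in tickers if t in sdg_mapping for sdg in sdg_mapping[t]]
--     keys = dict.fromkeys(s for s, _ in pairs)
--     return {s: [t for x, t in pairs if x == s] for s in keys}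
-- ===== Notes on version B (the rewrite author's own statement) =====
-- stated objective: alternative
-- what changed: Replaces A's single-pass dict accumulation by a flatten-then-group shape: build the flat (sdg, ticker) pair list once, dedupe the sdg keys in first-appearance order, then collect each key's tickers by filtering the pair list.
import Mathlib
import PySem

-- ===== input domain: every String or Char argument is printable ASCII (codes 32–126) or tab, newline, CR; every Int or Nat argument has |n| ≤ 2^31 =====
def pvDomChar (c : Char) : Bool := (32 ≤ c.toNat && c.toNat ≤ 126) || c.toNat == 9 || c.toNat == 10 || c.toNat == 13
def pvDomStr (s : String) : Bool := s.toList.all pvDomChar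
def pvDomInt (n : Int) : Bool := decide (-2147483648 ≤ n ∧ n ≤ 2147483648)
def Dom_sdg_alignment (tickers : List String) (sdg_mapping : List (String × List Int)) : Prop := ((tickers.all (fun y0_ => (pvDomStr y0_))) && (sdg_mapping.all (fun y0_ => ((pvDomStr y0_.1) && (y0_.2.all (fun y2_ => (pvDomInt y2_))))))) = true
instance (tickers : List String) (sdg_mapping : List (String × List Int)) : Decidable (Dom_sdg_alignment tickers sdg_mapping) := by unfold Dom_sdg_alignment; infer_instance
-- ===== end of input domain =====

-- B replaces A's single-pass dict accumulation by flatten-to-pairs, dedupe keys, filter-per-key grouping (alternative decomposition, same results).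


-- ===== PORT A =====
-- 'sdg_portfolio = {}; for ticker: if ticker in mapping: for sdg in mapping[ticker]: if sdg not in d: d[sdg] = []; d[sdg].append(ticker)'
def sdg_alignment (tickers : List String) (sdg_mapping : List (String × List Int)) : List (Int × List String) :=
  (tickers.foldl (fun (d : PySem.Dict Int (List String)) ticker =>
      match (PySem.Dict.mk sdg_mapping).get? ticker with
      | some sdgs =>
          sdgs.foldl (fun d sdg =>
            let d := if d.contains sdg then d else d.insert sdg []
            d.modify sdg [] (· ++ [ticker])) d
      | none => d)
    PySem.Dict.empty).items

-- ===== PORT B =====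
-- 'pairs = [(sdg, t) for t in tickers if t in sdg_mapping for sdg in sdg_mapping[t]];
--  keys = dict.fromkeys(s for s, _ in pairs); return {s: [t for x, t in pairs if x == s] for s in keys}'
def sdg_alignment_alt (tickers : List String) (sdg_mapping : List (String × List Int)) : List (Int × List String) :=
  let pairs : List (Int × String) := tickers.foldl (fun acc t =>
      match (PySem.Dict.mk sdg_mapping).get? t with
      | some sdgs => acc ++ sdgs.map (fun s => (s, t))
      | none => acc) []
  let keys : List Int := PySem.List.dedup (pairs.map (·.1))
  keys.map (fun s => (s, (pairs.filter (fun p => p.1 == s)).map (·.2)))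

-- ===== PRECONDITION & SPEC =====
def Spec_sdg_alignment (tickers : List String) (sdg_mapping : List (String × List Int)) (out : List (Int × List String)) : Prop := out = sdg_alignment_alt tickers sdg_mapping
instance (tickers : List String) (sdg_mapping : List (String × List Int)) (out : List (Int × List String)) : Decidable (Spec_sdg_alignment tickers sdg_mapping out) := by unfold Spec_sdg_alignment; infer_instance

-- ===== CLAIM (what is proved, stated in full; the proofs are below) =====
def Claim_equal_sdg_alignment : Prop := ∀ (tickers : List String) (sdg_mapping : List (String × List Int)), Dom_sdg_alignment tickers sdg_mapping → Spec_sdg_alignment tickers sdg_mapping (sdg_alignment tickers sdg_mapping)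

-- ===== LEMMAS AND PROOFS =====

-- A's per-pair step (insert-if-missing + append), as one function of the (sdg, ticker) pair
def pvStep (d : PySem.Dict Int (List String)) (p : Int × String) : PySem.Dict Int (List String) :=
  d.modify p.1 [] (· ++ [p.2])

-- the (sdg, ticker) pairs one ticker contributes
def pvPairs (sdg_mapping : List (String × List Int)) (t : String) : List (Int × String) :=
  match (PySem.Dict.mk sdg_mapping).get? t with
  | some sdgs => sdgs.map (fun s => (s, t))
  | none => []

-- A's 'insert [] if missing, then append' is exactly modify-with-default-[]
theorem pvStep_insert_empty (d : PySem.Dict Int (List String)) (k : Int) (v : String) :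
    ((if d.contains k then d else d.insert k []).modify k [] (· ++ [v])) = pvStep d (k, v) := by
  by_cases h : d.contains k = true
  · simp [h, pvStep]
  · simp only [Bool.not_eq_true] at h
    simp only [h, Bool.false_eq_true, ite_false, pvStep]
    apply PySem.Dict.ext
    have hk : ∀ p ∈ d.items, p.1 ≠ k := by
      intro p hp hpk
      have : d.contains k = true := by
        rw [PySem.Dict.contains_iff_mem_keys]
        exact hpk ▸ PySem.Dict.mem_keys_of_mem_items d hp
      simp [this] at h
    have h1 : (d.insert k []).contains k = true := PySem.Dict.contains_insert_self d k []
    show ((d.insert k []).modify k [] (· ++ [v])).items = (d.modify k [] (· ++ [v])).items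
    calc ((d.insert k []).modify k [] (· ++ [v])).items
        = ((d.insert k []).insert k (((d.insert k []).getD k []) ++ [v])).items := rfl
      _ = ((d.insert k []).insert k ([] ++ [v])).items := by rw [PySem.Dict.getD_insert_self]
      _ = d.items ++ [(k, [v])] := by
            rw [PySem.Dict.items_insert_of_contains _ _ h1,
                PySem.Dict.items_insert_of_not_contains _ _ h]
            rw [List.map_append]
            congr 1
            · calc List.map (fun p => if (p.1 == k) = true then (k, [] ++ [v]) else p) d.items
                  = List.map id d.items := by
                    apply List.map_congr_left; intro p hp
                    simp [hk p hp]
                _ = d.items := List.map_id d.items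
            · simp
      _ = (d.modify k [] (· ++ [v])).items := by
            show _ = (d.insert k (d.getD k [] ++ [v])).items
            rw [PySem.Dict.items_insert_of_not_contains _ _ h]
            have : d.getD k [] = [] := PySem.Dict.getD_of_not_contains d [] h
            rw [this]
            simp

-- A's nested loops = one fold of pvStep over the flat pair list
theorem pvA_fold_eq (tickers : List String) (sdg_mapping : List (String × List Int))
    (d : PySem.Dict Int (List String)) :
    (tickers.foldl (fun d ticker =>
      match (PySem.Dict.mk sdg_mapping).get? ticker with
      | some sdgs =>
          sdgs.foldl (fun d sdg =>
            let d := if d.contains sdg then d else d.insert sdg []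
            d.modify sdg [] (· ++ [ticker])) d
      | none => d) d)
    = (tickers.flatMap (pvPairs sdg_mapping)).foldl pvStep d := by
  induction tickers generalizing d with
  | nil => rfl
  | cons t rest ih =>
    simp only [List.foldl_cons, List.flatMap_cons, List.foldl_append]
    rw [ih]
    congr 1
    unfold pvPairs
    cases hg : (PySem.Dict.mk sdg_mapping).get? t with
    | none => rfl
    | some sdgs =>
      simp only [List.foldl_map]
      apply PySem.List.foldl_congr_mem
      intro acc x _
      exact pvStep_insert_empty acc x t

-- a dict with Nodup keys is determined by its keys and lookups
theorem pvItems_eq_keys_map (d : PySem.Dict Int (List String)) (h : d.keys.Nodup) :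
    d.items = d.keys.map (fun k => (k, d.getD k [])) := by
  have : d.keys.map (fun k => (k, d.getD k [])) = d.items.map (fun p => (p.1, d.getD p.1 [])) := by
    simp only [PySem.Dict.keys, List.map_map]; rfl
  rw [this]
  calc d.items = List.map id d.items := (List.map_id d.items).symm
    _ = d.items.map (fun p => (p.1, d.getD p.1 [])) := by
        apply List.map_congr_left
        intro p hp
        have := PySem.Dict.getD_of_mem_items d (k := p.1) (v := p.2) hp h []
        simp [this]

-- B's pair-building loop = the same flat pair list
theorem pvPairs_foldl_eq (tickers : List String) (sdg_mapping : List (String × List Int)) :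
    (tickers.foldl (fun acc t =>
      match (PySem.Dict.mk sdg_mapping).get? t with
      | some sdgs => acc ++ sdgs.map (fun s => (s, t))
      | none => acc) ([] : List (Int × String)))
    = tickers.flatMap (pvPairs sdg_mapping) := by
  have := PySem.List.foldl_append_eq_flatMap (l := tickers) (g := pvPairs sdg_mapping) (acc := [])
  simp only [List.nil_append] at this
  rw [← this]
  apply PySem.List.foldl_congr_mem
  intro acc t _
  unfold pvPairs
  cases (PySem.Dict.mk sdg_mapping).get? t <;> simp

-- the items of pvStep's fold over any pair list = keys in first-appearance order, each with its filtered tickers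
theorem pvDict_items (P : List (Int × String)) :
    (P.foldl pvStep PySem.Dict.empty).items
    = (PySem.Set.ofList (P.map Prod.fst)).map
        (fun s => (s, (P.filter (fun p => p.1 == s)).map (·.2))) := by
  have hnod : (P.foldl pvStep PySem.Dict.empty).keys.Nodup :=
    PySem.Dict.nodup_keys_foldl_modify_key P Prod.fst [] (fun _ x v => v ++ [x.2])
      PySem.Dict.empty (by simp [PySem.Dict.keys_empty])
  have hkeys : (P.foldl pvStep PySem.Dict.empty).keys
      = PySem.Set.ofList (P.map Prod.fst) :=
    PySem.Dict.keys_foldl_modify_key P Prod.fst [] (fun _ x v => v ++ [x.2]) PySem.Dict.empty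
  have hgetD : ∀ c : Int, (P.foldl pvStep PySem.Dict.empty).getD c []
      = (P.filter (fun p => p.1 == c)).map (·.2) := by
    intro c
    have := PySem.Dict.getD_foldl_modify_append P PySem.Dict.empty c
    simpa using this
  rw [pvItems_eq_keys_map _ hnod, hkeys]
  apply List.map_congr_left
  intro s _
  rw [hgetD s]

-- ===== VERDICT (by name: the statement is the Claim_ definition above) =====
theorem sdg_alignment_spec : Claim_equal_sdg_alignment := by
  intro tickers sdg_mapping _
  show sdg_alignment tickers sdg_mapping = sdg_alignment_alt tickers sdg_mapping
  unfold sdg_alignment sdg_alignment_alt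
  rw [pvA_fold_eq, pvPairs_foldl_eq, pvDict_items]
  rfl
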